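-- pv_equiv track=rewrite | github.com/Xainulabdeen/Filter-sorting | filter.py | filter_sort
-- ===== SOURCE A (Python) =====
-- def filter_sort(filter_params, dataset):
--     filtered_lists = {}
--
--     # Step 1: Filter and sort individual lists
--     for param in filter_params:
--         filtered_lists[param] = [item for item in dataset if item.startswith(param)]
--         filtered_lists[param].sort()
--
--     # Step 2: Combine all sorted lists into a single list and sort it
--     combined_sorted_list = []
--     for key in filter_params:
--         combined_sorted_list.extend(filtered_lists[key])
--
--     # Sort the combined list
--     combined_sorted_list.sort()
--
--     return combined_sorted_list
-- ===== SOURCE B (Python) =====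
-- def filter_sort(filter_params, dataset):
--     # Count each filter param once (duplicates counted), then for each item of the
--     # pre-sorted dataset count the matching params by looking up every prefix of the
--     # item in that counter, emitting the item that many times.  Output stays sorted.
--     counts = {}
--     for p in filter_params:
--         counts[p] = counts.get(p, 0) + 1
--     out = []
--     for item in sorted(dataset):
--         c = 0
--         for k in range(len(item) + 1):
--             c += counts.get(item[:k], 0)
--         out.extend([item] * c)
--     return out
-- ===== Notes on version B (the rewrite author's own statement) =====
-- stated objective: faster
-- what changed: Instead of filtering the whole dataset once per filter param and sorting the combined result, B builds a counter of the params once, sorts the dataset once, and for each item counts matching params by looking up each of its prefixes in the counter, emitting the item with that multiplicity directly in sorted order.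
import Mathlib
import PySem

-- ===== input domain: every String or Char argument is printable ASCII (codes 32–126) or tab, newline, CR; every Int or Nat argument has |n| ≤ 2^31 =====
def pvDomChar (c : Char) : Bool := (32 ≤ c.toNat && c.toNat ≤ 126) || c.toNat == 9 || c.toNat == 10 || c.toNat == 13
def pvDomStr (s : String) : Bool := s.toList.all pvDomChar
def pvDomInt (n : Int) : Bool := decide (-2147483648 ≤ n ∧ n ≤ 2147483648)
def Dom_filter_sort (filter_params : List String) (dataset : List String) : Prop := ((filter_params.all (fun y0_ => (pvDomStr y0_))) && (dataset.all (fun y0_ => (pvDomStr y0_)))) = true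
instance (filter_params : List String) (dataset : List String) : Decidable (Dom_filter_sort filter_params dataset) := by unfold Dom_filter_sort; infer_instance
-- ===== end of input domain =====

-- B replaces A's per-param filtering of the whole dataset plus a final sort of the combined
-- list by a counter of the params, one sort of the dataset, and a per-item prefix-lookup walk
-- (objective: faster).

-- ===== PORT A =====
def filter_sort (filter_params : List String) (dataset : List String) : List String :=
  -- Step 1: filtered_lists[param] = [item for item in dataset if item.startswith(param)]; then .sort() in place
  let filtered_lists : PySem.Dict String (List String) :=
    filter_params.foldl (fun d param =>
      let d := d.insert param (dataset.filter (fun item => PySem.Str.startswith item param))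
      d.insert param (PySem.List.sorted (d.getD param []) (fun x => x) false)) PySem.Dict.empty
  -- Step 2: combined_sorted_list.extend(filtered_lists[key]); the key is always present
  -- (it was inserted in step 1), so getD with default [] is exact (no KeyError path).
  let combined_sorted_list :=
    filter_params.foldl (fun acc key => acc ++ filtered_lists.getD key []) []
  PySem.List.sorted combined_sorted_list (fun x => x) false

-- ===== PORT B =====
def filter_sort_alt (filter_params : List String) (dataset : List String) : List String :=
  -- counts[p] = counts.get(p, 0) + 1
  let counts : PySem.Dict String Int :=
    filter_params.foldl (fun d p => d.insert p (d.getD p 0 + 1)) PySem.Dict.empty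
  -- for item in sorted(dataset): c = sum of counts.get(item[:k], 0); out.extend([item] * c)
  (PySem.List.sorted dataset (fun x => x) false).foldl (fun out item =>
    let c : Int := (PySem.List.pyRange 0 (PySem.Str.len item + 1) 1).foldl
      (fun c k => c + counts.getD (PySem.Str.slice item none (some k)) 0) 0
    out ++ PySem.List.pyRepeat [item] c) []

-- ===== PRECONDITION & SPEC =====
def Spec_filter_sort (filter_params : List String) (dataset : List String) (out : List String) : Prop := out = filter_sort_alt filter_params dataset
instance (filter_params : List String) (dataset : List String) (out : List String) : Decidable (Spec_filter_sort filter_params dataset out) := by unfold Spec_filter_sort; infer_instance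

-- ===== CLAIM (what is proved, stated in full; the proofs are below) =====
def Claim_equal_filter_sort : Prop := ∀ (filter_params : List String) (dataset : List String), Dom_filter_sort filter_params dataset → Spec_filter_sort filter_params dataset (filter_sort filter_params dataset)

-- ===== LEMMAS AND PROOFS =====

-- 'item.startswith(p)' as the match predicate
def pvMatch (item p : String) : Bool := PySem.Str.startswith item p
-- A's per-param sorted filtered list
def pvF (dataset : List String) (p : String) : List String :=
  PySem.List.sorted (dataset.filter (fun item => pvMatch item p)) (fun x => x) false

-- a fold of inserts of a key-determined value maps every processed key to that value
lemma getD_foldl_insertF (F : String → List String) :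
    ∀ (fp : List String) (d : PySem.Dict String (List String)) (s : String),
      (fp.foldl (fun d p => d.insert p (F p)) d).getD s []
        = if s ∈ fp then F s else d.getD s [] := by
  intro fp
  induction fp with
  | nil => intro d s; simp
  | cons p fp ih =>
    intro d s
    simp only [List.foldl_cons, ih, List.mem_cons]
    by_cases hm : s ∈ fp
    · simp [hm]
    · simp only [hm, or_false, if_false]
      rw [PySem.Dict.getD_insert]
      by_cases he : s = p
      · simp [he]
      · simp [he]

-- A's step-1 dict maps every param of filter_params to pvF
lemma getD_dictA (dataset : List String) (fp : List String)
    (d : PySem.Dict String (List String)) (s : String) :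
      (fp.foldl (fun d param =>
        let d := d.insert param (dataset.filter (fun item => PySem.Str.startswith item param))
        d.insert param (PySem.List.sorted (d.getD param []) (fun x => x) false)) d).getD s []
      = if s ∈ fp then pvF dataset s else d.getD s [] := by
  have hstep : (fun (d : PySem.Dict String (List String)) param =>
        let d := d.insert param (dataset.filter (fun item => PySem.Str.startswith item param))
        d.insert param (PySem.List.sorted (d.getD param []) (fun x => x) false))
      = (fun d p => d.insert p (pvF dataset p)) := by
    funext d p
    simp only [PySem.Dict.getD_insert_self, PySem.Dict.insert_insert_self, pvF, pvMatch]
  rw [hstep, getD_foldl_insertF]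

-- among the prefixes s[:k], k = 0..len(s), exactly one equals p iff p is a prefix of s
lemma sum_indicator_take (cs : List Char) (p : String) :
    ((List.range (cs.length + 1)).map
      (fun k => if String.ofList (cs.take k) = p then (1 : Int) else 0)).sum
    = if p.toList <+: cs then 1 else 0 := by
  by_cases h : p.toList <+: cs
  · have hlen : p.toList.length ≤ cs.length := h.length_le
    have hmap : ((List.range (cs.length + 1)).map
        (fun k => if String.ofList (cs.take k) = p then (1 : Int) else 0))
        = ((List.range (cs.length + 1)).map
        (fun k => if (k == p.toList.length) = true then (1 : Int) else 0)) := by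
      apply List.map_congr_left
      intro k hk
      have hk' : k ≤ cs.length := by
        have := List.mem_range.mp hk; omega
      congr 1
      simp only [beq_iff_eq, eq_iff_iff]
      constructor
      · intro he
        have : (cs.take k).length = p.toList.length := by
          rw [show cs.take k = p.toList from by
            rw [← he, String.toList_ofList]]
        simpa [Nat.min_eq_left hk'] using this
      · intro hke
        subst hke
        have := List.prefix_iff_eq_take.mp h
        apply String.toList_injective
        rw [String.toList_ofList, ← this]
    rw [hmap, PySem.List.sum_map_ite_one_zero, if_pos h]
    have : List.countP (fun k => k == p.toList.length) (List.range (cs.length + 1))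
        = List.count p.toList.length (List.range (cs.length + 1)) := rfl
    rw [this, List.count_eq_one_of_mem List.nodup_range (List.mem_range.mpr (by omega))]
    rfl
  · rw [if_neg h]
    apply List.sum_eq_zero
    intro x hx
    obtain ⟨k, hk, rfl⟩ := List.mem_map.mp hx
    rw [if_neg]
    intro he
    apply h
    have : cs.take k = p.toList := by rw [← he, String.toList_ofList]
    rw [← this]
    exact List.take_prefix k cs

-- summing the multiplicities of all prefixes of s counts the matching params
lemma prefix_sum (fp : List String) (s : String) :
    ((List.range (s.toList.length + 1)).map
      (fun k => (fp.count (String.ofList (s.toList.take k)) : Int))).sum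
    = (fp.countP (fun p => pvMatch s p) : Int) := by
  induction fp with
  | nil => simp
  | cons p fp ih =>
    have hsplit : ((List.range (s.toList.length + 1)).map
        (fun k => ((p :: fp).count (String.ofList (s.toList.take k)) : Int))).sum
      = ((List.range (s.toList.length + 1)).map
          (fun k => (fp.count (String.ofList (s.toList.take k)) : Int))).sum
        + ((List.range (s.toList.length + 1)).map
          (fun k => if String.ofList (s.toList.take k) = p then (1 : Int) else 0)).sum := by
      rw [← List.sum_map_add]
      apply congrArg
      apply List.map_congr_left
      intro k _
      rw [List.count_cons]
      push_cast
      congr 1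
      by_cases he : String.ofList (s.toList.take k) = p
      · simp [he]
      · simp [he, Ne.symm he]
    rw [hsplit, ih, sum_indicator_take, List.countP_cons]
    have : pvMatch s p = true ↔ p.toList <+: s.toList := by
      rw [pvMatch, PySem.Str.startswith_eq, PySem.Chars.startswith_iff]
    by_cases hm : p.toList <+: s.toList
    · rw [if_pos hm, if_pos (this.mpr hm)]; push_cast; ring
    · rw [if_neg hm, if_neg (fun hc => hm (this.mp hc))]; push_cast; ring

-- s[:k] is the k-character prefix
lemma slice_prefix (s : String) (k : Nat) :
    PySem.Str.slice s none (some (k : Int)) = String.ofList (s.toList.take k) := by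
  apply String.toList_injective
  rw [String.toList_ofList, PySem.Str.toList_slice, PySem.Chars.slice_eq_listSlice,
    PySem.List.slice_to_natCast]

-- B's inner loop computes the number of matching params (with multiplicity)
lemma c_eq_countP (fp : List String) (s : String) :
    (PySem.List.pyRange 0 (PySem.Str.len s + 1) 1).foldl
      (fun c k => c + (fp.foldl (fun d p => d.insert p (d.getD p 0 + 1)) PySem.Dict.empty).getD
        (PySem.Str.slice s none (some k)) 0) 0
    = (fp.countP (fun p => pvMatch s p) : Int) := by
  rw [PySem.Dict.foldl_insert_getD_add_one_eq_counter]
  rw [PySem.List.foldl_add _ (fun k => (PySem.Dict.counter fp).getD (PySem.Str.slice s none (some k)) 0)]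
  rw [PySem.List.pyRange_one, List.map_map]
  rw [← prefix_sum fp s]
  rw [show (PySem.Str.len s + 1 - 0).toNat = s.toList.length + 1 by
    rw [PySem.Str.len_eq]; omega]
  rw [zero_add]
  apply congrArg
  apply List.map_congr_left
  intro k _
  simp only [Function.comp_apply, zero_add]
  rw [slice_prefix, PySem.Dict.getD_counter]

-- count of any string in B's output
lemma count_flatMap_replicate (g : String → Nat) (l : List String) (s : String) :
    (l.flatMap (fun x => List.replicate (g x) x)).count s = l.count s * g s := by
  induction l with
  | nil => simp
  | cons x l ih =>
    simp only [List.flatMap_cons, List.count_append, ih, List.count_replicate, List.count_cons]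
    by_cases h : x = s
    · subst h; simp [Nat.add_mul]; ring
    · simp [h]

-- count of any string in the concatenation of A's filtered lists
lemma count_flatMap_filter (fp ds : List String) (s : String) :
    (fp.flatMap (fun p => ds.filter (fun item => pvMatch item p))).count s
      = ds.count s * fp.countP (fun p => pvMatch s p) := by
  induction fp with
  | nil => simp
  | cons p fp ih =>
    simp only [List.flatMap_cons, List.count_append, ih, List.countP_cons]
    by_cases h : pvMatch s p = true
    · have hc : (ds.filter (fun item => pvMatch item p)).count s = ds.count s :=
        List.count_filter (p := fun item => pvMatch item p) h
      simp [hc, h, Nat.mul_add]; ring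
    · have : (ds.filter (fun item => pvMatch item p)).count s = 0 := by
        rw [List.count_eq_zero]
        intro hm
        exact h (by simpa using (List.mem_filter.mp hm).2)
      simp [this, h]

-- blocks of equal elements emitted along a sorted list stay sorted
lemma pairwise_flatMap_replicate (g : String → Nat) (l : List String)
    (h : l.Pairwise (· ≤ ·)) :
    (l.flatMap (fun x => List.replicate (g x) x)).Pairwise (· ≤ ·) := by
  induction l with
  | nil => simp
  | cons x l ih =>
    rcases List.pairwise_cons.mp h with ⟨hx, hl⟩
    simp only [List.flatMap_cons]
    rw [List.pairwise_append]
    refine ⟨List.pairwise_replicate.mpr (Or.inr le_rfl), ih hl, ?_⟩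
    intro a ha b hb
    obtain rfl := List.eq_of_mem_replicate ha
    obtain ⟨y, hy, hby⟩ := List.mem_flatMap.mp hb
    rw [List.eq_of_mem_replicate hby]
    exact hx y hy

-- sorting each per-param block is a permutation of the raw filtered blocks
lemma perm_flatMap_sorted (fp ds : List String) :
    (fp.flatMap (fun p => pvF ds p)).Perm
      (fp.flatMap (fun p => ds.filter (fun item => pvMatch item p))) := by
  induction fp with
  | nil => simp
  | cons p fp ih =>
    simp only [List.flatMap_cons]
    exact (PySem.List.sorted_perm _ _ _).append ih

-- ===== VERDICT (by name: the statement is the Claim_ definition above) =====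
theorem filter_sort_spec : Claim_equal_filter_sort := by
  intro fp ds _
  unfold Spec_filter_sort filter_sort filter_sort_alt
  simp only [PySem.List.foldl_append_eq_flatMap, List.nil_append]
  have hB : ((PySem.List.sorted ds (fun x => x) false).flatMap (fun item =>
      PySem.List.pyRepeat [item] ((PySem.List.pyRange 0 (PySem.Str.len item + 1) 1).foldl
        (fun c k => c + (fp.foldl (fun d p => d.insert p (d.getD p 0 + 1)) PySem.Dict.empty).getD
          (PySem.Str.slice item none (some k)) 0) 0)))
      = (PySem.List.sorted ds (fun x => x) false).flatMap
          (fun x => List.replicate (fp.countP (fun p => pvMatch x p)) x) := by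
    apply List.flatMap_congr
    intro x _
    rw [c_eq_countP, PySem.List.pyRepeat_singleton, Int.toNat_natCast]
  rw [hB]
  have hA : (fp.flatMap (fun key =>
      (fp.foldl (fun d param =>
        let d := d.insert param (ds.filter (fun item => PySem.Str.startswith item param))
        d.insert param (PySem.List.sorted (d.getD param []) (fun x => x) false)) PySem.Dict.empty).getD key []))
      = fp.flatMap (fun p => pvF ds p) := by
    apply List.flatMap_congr
    intro x hx
    rw [getD_dictA, if_pos hx]
  rw [hA]
  apply PySem.List.sorted_id_eq_of_perm_of_pairwise
  · rw [List.perm_iff_count]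
    intro a
    rw [count_flatMap_replicate,
      (PySem.List.sorted_perm ds (fun x => x) false).count_eq,
      (perm_flatMap_sorted fp ds).count_eq, count_flatMap_filter]
  · exact pairwise_flatMap_replicate _ _
      (PySem.List.sorted_pairwise ds (fun x => x))
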